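-- pv_equiv track=rewrite | github.com/jbalcomb/ReMoM | tools/todolist/extract_stub_wip_functions.py | Create_Stub_Wip_Todo_Markdown
-- ===== SOURCE A (Python) =====
-- def Create_Stub_Wip_Todo_Markdown(function_entries: list[tuple[str, str]], title: str = "STUB and WIP Function TODO List") -> str:
--     output_lines = [f"# {title}", ""]
--
--     if not function_entries:
--         output_lines.append("No `__STUB` or `__WIP` functions were found.")
--         output_lines.append("")
--         return "\n".join(output_lines)
--
--     current_module = None
--
--     for module_name, function_name in function_entries:
--         if module_name != current_module:
--             if current_module is not None:
--                 output_lines.append("")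
--
--             output_lines.append(f"## {module_name}")
--             current_module = module_name
--
--         output_lines.append(f"- [ ] {function_name}")
--
--     output_lines.append("")
--
--     return "\n".join(output_lines)
-- ===== SOURCE B (Python) =====
-- def Create_Stub_Wip_Todo_Markdown(function_entries: list[tuple[str, str]], title: str = "STUB and WIP Function TODO List") -> str:
--     if not function_entries:
--         return f"# {title}\n\nNo `__STUB` or `__WIP` functions were found.\n"
--     blocks = []
--     i = 0
--     n = len(function_entries)
--     while i < n:
--         module_name = function_entries[i][0]
--         lines = [f"## {module_name}"]
--         j = i
--         while j < n and function_entries[j][0] == module_name: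
--             lines.append(f"- [ ] {function_entries[j][1]}")
--             j += 1
--         blocks.append("\n".join(lines))
--         i = j
--     return f"# {title}\n\n" + "\n\n".join(blocks) + "\n"
-- ===== Notes on version B (the rewrite author's own statement) =====
-- stated objective: idiomatic
-- what changed: Replaces the current_module state machine appending to one flat line list by a grouping pass that slices consecutive same-module runs into per-module blocks, each joined with '\n', and then joins the blocks with '\n\n'.
import Mathlib
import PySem

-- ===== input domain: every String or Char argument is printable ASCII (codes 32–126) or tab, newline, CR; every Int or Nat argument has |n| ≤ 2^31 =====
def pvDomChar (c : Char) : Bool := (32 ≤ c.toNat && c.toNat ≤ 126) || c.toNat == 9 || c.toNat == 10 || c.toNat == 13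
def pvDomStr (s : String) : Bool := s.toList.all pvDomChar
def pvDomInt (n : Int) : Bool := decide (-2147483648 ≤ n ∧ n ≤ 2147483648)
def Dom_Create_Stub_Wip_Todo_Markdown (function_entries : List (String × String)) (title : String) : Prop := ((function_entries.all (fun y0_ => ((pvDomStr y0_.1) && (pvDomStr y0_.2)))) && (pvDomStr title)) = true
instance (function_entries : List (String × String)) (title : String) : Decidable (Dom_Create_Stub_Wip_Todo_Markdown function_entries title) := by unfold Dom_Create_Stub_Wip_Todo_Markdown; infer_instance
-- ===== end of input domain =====

-- B replaces A's current_module state machine by a grouping pass over consecutive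
-- same-module runs followed by a per-block join (idiomatic decomposition; same cost).

-- ===== PORT A =====
-- literal transliteration of A: a flat line list plus a current_module register,
-- one fold over the entries, then '\n'.join with a trailing "".
def Create_Stub_Wip_Todo_Markdown (function_entries : List (String × String)) (title : String) : String :=
  let output_lines : List String := ["# " ++ title, ""]
  if function_entries = [] then
    PySem.Str.join "\n" (output_lines ++ ["No `__STUB` or `__WIP` functions were found.", ""])
  else
    let st := function_entries.foldl
      (fun (st : List String × Option String) e =>
        let st' :=
          if some e.1 ≠ st.2 then
            ((if st.2 ≠ none then st.1 ++ [""] else st.1) ++ ["## " ++ e.1], some e.1)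
          else st
        (st'.1 ++ ["- [ ] " ++ e.2], st'.2))
      (output_lines, (none : Option String))
    PySem.Str.join "\n" (st.1 ++ [""])

-- ===== PORT B =====
-- helper of B: slice the entry list into consecutive same-module runs
-- (the two nested while loops of Source B: takeWhile = the inner run-collecting loop).
def pvGroups : List (String × String) → List (String × List String)
  | [] => []
  | (m, f) :: rest =>
    let run := rest.takeWhile (fun e => e.1 == m)
    let rest' := rest.dropWhile (fun e => e.1 == m)
    (m, f :: run.map Prod.snd) :: pvGroups rest'
termination_by es => es.length
decreasing_by
  simp only [List.length_cons]
  exact Nat.lt_succ_of_le (List.length_dropWhile_le _ _)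

def Create_Stub_Wip_Todo_Markdown_alt (function_entries : List (String × String)) (title : String) : String :=
  if function_entries = [] then
    "# " ++ title ++ "\n\nNo `__STUB` or `__WIP` functions were found.\n"
  else
    let blocks := (pvGroups function_entries).map
      (fun g => PySem.Str.join "\n" (("## " ++ g.1) :: g.2.map (fun f => "- [ ] " ++ f)))
    "# " ++ title ++ "\n\n" ++ PySem.Str.join "\n\n" blocks ++ "\n"

-- ===== PRECONDITION & SPEC =====
def Spec_Create_Stub_Wip_Todo_Markdown (function_entries : List (String × String)) (title : String) (out : String) : Prop := out = Create_Stub_Wip_Todo_Markdown_alt function_entries title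
instance (function_entries : List (String × String)) (title : String) (out : String) : Decidable (Spec_Create_Stub_Wip_Todo_Markdown function_entries title out) := by unfold Spec_Create_Stub_Wip_Todo_Markdown; infer_instance

-- ===== CLAIM (what is proved, stated in full; the proofs are below) =====
def Claim_equal_Create_Stub_Wip_Todo_Markdown : Prop := ∀ (function_entries : List (String × String)) (title : String), Dom_Create_Stub_Wip_Todo_Markdown function_entries title → Spec_Create_Stub_Wip_Todo_Markdown function_entries title (Create_Stub_Wip_Todo_Markdown function_entries title)

-- ===== LEMMAS AND PROOFS =====

def pvBullet (f : String) : String := "- [ ] " ++ f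
def pvEmitG (g : String × List String) : List String := ("## " ++ g.1) :: g.2.map pvBullet
def pvTail (gs : List (String × List String)) : List String := gs.flatMap (fun g => "" :: pvEmitG g)
def pvBlock (g : String × List String) : String := PySem.Str.join "\n" (pvEmitG g)

-- A's loop step, named for the proofs (definitionally the lambda in the port)
def pvStepA (st : List String × Option String) (e : String × String) : List String × Option String :=
  let st' :=
    if some e.1 ≠ st.2 then
      ((if st.2 ≠ none then st.1 ++ [""] else st.1) ++ ["## " ++ e.1], some e.1)
    else st
  (st'.1 ++ ["- [ ] " ++ e.2], st'.2)

-- the lines A's loop appends, as a structural recursion on the entries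
def pvBody (cm : Option String) : List (String × String) → List String
  | [] => []
  | (m, f) :: rest =>
    if some m ≠ cm then
      (if cm ≠ none then [""] else []) ++ ["## " ++ m, pvBullet f] ++ pvBody (some m) rest
    else pvBullet f :: pvBody cm rest

theorem pv_join_singleton (sep p : String) : PySem.Str.join sep [p] = p := by
  apply String.toList_injective
  simp [PySem.Str.toList_join, PySem.Chars.join_singleton]

theorem pv_join_cc (sep p q : String) (rest : List String) :
    PySem.Str.join sep (p :: q :: rest) = p ++ sep ++ PySem.Str.join sep (q :: rest) := by
  apply String.toList_injective
  simp [PySem.Str.toList_join, PySem.Chars.join_cons_cons]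

theorem pv_join_cons (sep x : String) (L : List String) (hL : L ≠ []) :
    PySem.Str.join sep (x :: L) = x ++ sep ++ PySem.Str.join sep L := by
  cases L with
  | nil => exact absurd rfl hL
  | cons y ys => exact pv_join_cc sep x y ys

theorem pv_join_append (sep : String) (xs ys : List String) (hx : xs ≠ []) (hy : ys ≠ []) :
    PySem.Str.join sep (xs ++ ys) = PySem.Str.join sep xs ++ sep ++ PySem.Str.join sep ys := by
  induction xs with
  | nil => exact absurd rfl hx
  | cons x xs ih =>
    cases xs with
    | nil =>
      cases ys with
      | nil => exact absurd rfl hy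
      | cons y ys => simp [pv_join_cc, pv_join_singleton]
    | cons x' xs' =>
      have h := ih (by simp)
      simp only [List.cons_append] at *
      rw [pv_join_cc, pv_join_cc, h]
      simp [String.append_assoc]

theorem pv_foldA_aux (es : List (String × String)) : ∀ (acc : List String) (cm : Option String),
    (es.foldl pvStepA (acc, cm)).1 = acc ++ pvBody cm es := by
  induction es with
  | nil => intro acc cm; simp [pvBody]
  | cons e rest ih =>
    intro acc cm
    rw [List.foldl_cons]
    by_cases h : some e.1 = cm
    · have hstep : pvStepA (acc, cm) e = (acc ++ ["- [ ] " ++ e.2], cm) := by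
        simp [pvStepA, h]
      rw [hstep, ih]
      simp [pvBody, h, pvBullet]
    · cases cm with
      | none =>
        have hstep : pvStepA (acc, none) e
            = (acc ++ ["## " ++ e.1] ++ ["- [ ] " ++ e.2], some e.1) := by
          simp [pvStepA, h]
        rw [hstep, ih]
        simp [pvBody, h, pvBullet]
      | some c =>
        have hstep : pvStepA (acc, some c) e
            = (acc ++ [""] ++ ["## " ++ e.1] ++ ["- [ ] " ++ e.2], some e.1) := by
          simp [pvStepA, h]
        rw [hstep, ih]
        simp [pvBody, h, pvBullet]

theorem pv_foldA (es : List (String × String)) (acc : List String) (cm : Option String) :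
    (es.foldl
      (fun (st : List String × Option String) e =>
        let st' :=
          if some e.1 ≠ st.2 then
            ((if st.2 ≠ none then st.1 ++ [""] else st.1) ++ ["## " ++ e.1], some e.1)
          else st
        (st'.1 ++ ["- [ ] " ++ e.2], st'.2)) (acc, cm)).1 = acc ++ pvBody cm es :=
  pv_foldA_aux es acc cm

theorem pv_body_some (rest : List (String × String)) : ∀ (m : String),
    pvBody (some m) rest =
      (rest.takeWhile (fun e => e.1 == m)).map (fun e => pvBullet e.2) ++
        pvTail (pvGroups (rest.dropWhile (fun e => e.1 == m))) := by
  induction rest with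
  | nil => intro m; simp [pvGroups, pvTail, pvBody]
  | cons e r ih =>
    intro m
    obtain ⟨m', f⟩ := e
    by_cases h : m' = m
    · subst h
      simp [pvBody, ih]
    · have hb : ((fun (e : String × String) => e.1 == m) (m', f)) = false := by simp [h]
      rw [List.takeWhile_cons, List.dropWhile_cons]
      simp only [hb, Bool.false_eq_true, if_false]
      rw [pvGroups]
      simp [pvBody, h, pvTail, pvEmitG, ih m', List.map_map, Function.comp_def]

theorem pv_join_body (gs : List (String × List String)) : ∀ (g0 : String × List String),
    PySem.Str.join "\n" (pvEmitG g0 ++ pvTail gs) =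
      PySem.Str.join "\n\n" ((g0 :: gs).map pvBlock) := by
  induction gs with
  | nil => intro g0; simp [pvTail, pv_join_singleton, pvBlock]
  | cons g1 rest ih =>
    intro g0
    have htail : pvTail (g1 :: rest) = "" :: (pvEmitG g1 ++ pvTail rest) := by
      simp [pvTail]
    have hM : pvEmitG g1 ++ pvTail rest ≠ [] := by simp [pvEmitG]
    rw [htail,
        pv_join_append "\n" (pvEmitG g0) ("" :: (pvEmitG g1 ++ pvTail rest)) (by simp [pvEmitG]) (by simp),
        pv_join_cons "\n" "" _ hM, ih g1,
        show ((g0 :: g1 :: rest).map pvBlock) = pvBlock g0 :: (g1 :: rest).map pvBlock from rfl,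
        pv_join_cons "\n\n" (pvBlock g0) _ (by simp)]
    have h2 : ("\n" ++ ("" ++ ("\n" ++ PySem.Str.join "\n\n" ((g1 :: rest).map pvBlock)))) =
        "\n\n" ++ PySem.Str.join "\n\n" ((g1 :: rest).map pvBlock) := by
      apply String.toList_injective; simp
    rw [pvBlock, String.append_assoc, String.append_assoc, h2, ← String.append_assoc]

theorem pv_main (es : List (String × String)) (title : String) :
    Create_Stub_Wip_Todo_Markdown es title = Create_Stub_Wip_Todo_Markdown_alt es title := by
  cases es with
  | nil =>
    rw [Create_Stub_Wip_Todo_Markdown, Create_Stub_Wip_Todo_Markdown_alt]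
    rw [show ((["# " ++ title, ""] : List String) ++ ["No `__STUB` or `__WIP` functions were found.", ""]) =
      ("# " ++ title) :: "" :: "No `__STUB` or `__WIP` functions were found." :: [""] from rfl]
    rw [pv_join_cc, pv_join_cc, pv_join_cc, pv_join_singleton]
    apply String.toList_injective
    simp
  | cons e r =>
    obtain ⟨m, f⟩ := e
    rw [Create_Stub_Wip_Todo_Markdown, Create_Stub_Wip_Todo_Markdown_alt]
    simp only [if_neg (by simp : ¬ (((m, f) :: r : List (String × String)) = [])), pv_foldA]
    have hbody : pvBody none ((m, f) :: r) =
        pvEmitG (m, f :: (r.takeWhile (fun e => e.1 == m)).map Prod.snd) ++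
          pvTail (pvGroups (r.dropWhile (fun e => e.1 == m))) := by
      simp [pvBody, pv_body_some r m, pvEmitG, pvBullet, List.map_map, Function.comp_def]
    have hgroups : pvGroups ((m, f) :: r) =
        (m, f :: (r.takeWhile (fun e => e.1 == m)).map Prod.snd) ::
          pvGroups (r.dropWhile (fun e => e.1 == m)) := by
      rw [pvGroups]
    have hblocks : ∀ gs : List (String × List String),
        gs.map (fun g => PySem.Str.join "\n" (("## " ++ g.1) :: g.2.map (fun f => "- [ ] " ++ f)))
          = gs.map pvBlock := by
      intro gs; rfl
    rw [hgroups, hblocks, hbody]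
    rw [show ((["# " ++ title, ""] : List String) ++
          (pvEmitG (m, f :: (r.takeWhile (fun e => e.1 == m)).map Prod.snd) ++
            pvTail (pvGroups (r.dropWhile (fun e => e.1 == m)))) ++ [""]) =
        ("# " ++ title) :: "" :: ((pvEmitG (m, f :: (r.takeWhile (fun e => e.1 == m)).map Prod.snd) ++
          pvTail (pvGroups (r.dropWhile (fun e => e.1 == m)))) ++ [""]) from by simp]
    rw [pv_join_cc,
        pv_join_cons "\n" "" _ (by simp [pvEmitG]),
        pv_join_append "\n" _ [""] (by simp [pvEmitG]) (by simp),
        pv_join_body, pv_join_singleton]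
    apply String.toList_injective
    simp [PySem.Str.toList_join]

-- ===== VERDICT (by name: the statement is the Claim_ definition above) =====
theorem Create_Stub_Wip_Todo_Markdown_spec : Claim_equal_Create_Stub_Wip_Todo_Markdown := by
  intro es title _
  show Create_Stub_Wip_Todo_Markdown es title = Create_Stub_Wip_Todo_Markdown_alt es title
  exact pv_main es title
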